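-- pv_equiv track=rewrite | github.com/abourdim/callgraph | report/generator.py | _bfs
-- ===== SOURCE A (Python) =====
-- def _bfs(start, adj, max_d=999):
--     vis = {start:0}; q=[start]
--     while q:
--         n = q.pop(0); d = vis[n]
--         if d >= max_d: continue
--         for c in adj.get(n,[]):
--             if c not in vis: vis[c]=d+1; q.append(c)
--     return vis
-- ===== SOURCE B (Python) =====
-- def _bfs(start, adj, max_d=999):
--     # Build the BFS levels explicitly (seen-set + list of levels), then
--     # assemble the depth dict in one comprehension at the end.
--     seen = {start}
--     levels = [[start]]
--     d = 0
--     while levels[-1] and d < max_d: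
--         nxt = []
--         for n in levels[-1]:
--             for c in adj.get(n, []):
--                 if c not in seen:
--                     seen.add(c)
--                     nxt.append(c)
--         levels.append(nxt)
--         d += 1
--     return {n: d for d, lev in enumerate(levels) for n in lev}
-- ===== Notes on version B (the rewrite author's own statement) =====
-- stated objective: alternative
-- what changed: Instead of a FIFO queue with per-node depths looked up from the result dict, B computes the explicit list of BFS levels (a seen-set plus level lists, stopping when the level counter reaches max_d or a level is empty) and only at the end assembles the depth dict in one comprehension over the enumerated levels.
import Mathlib
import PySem

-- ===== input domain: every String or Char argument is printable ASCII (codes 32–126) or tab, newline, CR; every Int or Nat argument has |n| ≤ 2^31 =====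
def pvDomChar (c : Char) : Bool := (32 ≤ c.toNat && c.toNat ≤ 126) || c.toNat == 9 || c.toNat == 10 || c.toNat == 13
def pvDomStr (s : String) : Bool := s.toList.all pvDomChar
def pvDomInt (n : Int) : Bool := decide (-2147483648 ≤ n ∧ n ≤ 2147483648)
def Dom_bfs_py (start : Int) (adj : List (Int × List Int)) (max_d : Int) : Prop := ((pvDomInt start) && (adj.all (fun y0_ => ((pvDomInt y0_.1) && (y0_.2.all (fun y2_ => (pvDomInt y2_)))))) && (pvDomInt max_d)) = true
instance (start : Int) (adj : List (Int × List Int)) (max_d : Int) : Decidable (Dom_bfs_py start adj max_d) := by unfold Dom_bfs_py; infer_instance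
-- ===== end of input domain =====

-- B replaces A's FIFO queue with per-node depths looked up from the result dict by an explicit
-- computation of the BFS level lists (seen-set + levels), assembling the depth dict only at the
-- end from the enumerated levels; return values proved equal.

-- ===== PORT A =====
-- `if c not in vis: vis[c] = d+1; q.append(c)` — one step of A's inner `for c` loop;
-- the mutable state is the pair (vis, q).
def bfsStep (nd : Int) (p : PySem.Dict Int Int × List Int) (c : Int) : PySem.Dict Int Int × List Int :=
  if (p.1.get? c).isSome then p else (p.1.insert c nd, p.2 ++ [c])

-- A's `while q:` loop; fuel is a pure totality guard (one unit per popped node; the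
-- fuel passed in bfs_py is proved sufficient in the lemmas below).
def bfsLoopA (adj : PySem.Dict Int (List Int)) (max_d : Int) :
    Nat → PySem.Dict Int Int → List Int → PySem.Dict Int Int
  | 0, vis, _ => vis
  | _ + 1, vis, [] => vis
  | f + 1, vis, n :: q =>
    match vis.get? n with
    | none => vis   -- unreachable guard: every queued node is already a key of vis
    | some d =>
      if max_d ≤ d then bfsLoopA adj max_d f vis q
      else
        let st := (adj.getD n []).foldl (bfsStep (d + 1)) (vis, q)
        bfsLoopA adj max_d f st.1 st.2

def bfs_py (start : Int) (adj : List (Int × List Int)) (max_d : Int) : List (Int × Int) :=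
  (bfsLoopA ⟨adj⟩ max_d (1 + ((adj.map Prod.snd).flatten).length)
    (PySem.Dict.empty.insert start 0) [start]).items

-- ===== PORT B =====
-- `if c not in seen: seen.add(c); nxt.append(c)` — one step of B's inner loop; state (seen, nxt).
def bStep (p : PySem.Set Int × List Int) (c : Int) : PySem.Set Int × List Int :=
  if PySem.Set.contains p.1 c then p else (PySem.Set.add p.1 c, p.2 ++ [c])

-- B's `while levels[-1] and d < max_d:` loop: one fuel unit per level; `acc ++ [cur]` is
-- Python's `levels` list (cur = levels[-1]); returns the finished list of levels.
def bfsLevels (adj : PySem.Dict Int (List Int)) (max_d : Int) :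
    Nat → PySem.Set Int → List (List Int) → List Int → Int → List (List Int)
  | 0, _, acc, cur, _ => acc ++ [cur]
  | f + 1, seen, acc, cur, d =>
    if cur.isEmpty || decide (max_d ≤ d) then acc ++ [cur]
    else
      bfsLevels adj max_d f
        (cur.foldl (fun p n => (adj.getD n []).foldl bStep p) (seen, [])).1 (acc ++ [cur])
        (cur.foldl (fun p n => (adj.getD n []).foldl bStep p) (seen, [])).2 (d + 1)

-- `{n: d for d, lev in enumerate(levels) for n in lev}`
def bfs_py_alt (start : Int) (adj : List (Int × List Int)) (max_d : Int) : List (Int × Int) :=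
  ((PySem.List.enumerate (bfsLevels ⟨adj⟩ max_d (1 + ((adj.map Prod.snd).flatten).length)
      (PySem.Set.ofList [start]) [] [start] 0) 0).foldl
    (fun dct p => p.2.foldl (fun dct n => dct.insert n p.1) dct) PySem.Dict.empty).items

-- ===== PRECONDITION & SPEC =====
def Spec_bfs_py (start : Int) (adj : List (Int × List Int)) (max_d : Int) (out : List (Int × Int)) : Prop := out = bfs_py_alt start adj max_d
instance (start : Int) (adj : List (Int × List Int)) (max_d : Int) (out : List (Int × Int)) : Decidable (Spec_bfs_py start adj max_d out) := by unfold Spec_bfs_py; infer_instance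

-- ===== CLAIM (what is proved, stated in full; the proofs are below) =====
def Claim_equal_bfs_py : Prop := ∀ (start : Int) (adj : List (Int × List Int)) (max_d : Int), Dom_bfs_py start adj max_d → Spec_bfs_py start adj max_d (bfs_py start adj max_d)

-- ===== LEMMAS AND PROOFS =====

-- the (node, depth) pairs contributed by a list of levels whose first level has depth s
def pvPairs : List (List Int) → Int → List (Int × Int)
  | [], _ => []
  | lev :: rest, s => lev.map (fun n => (n, s)) ++ pvPairs rest (s + 1)

-- dict lookup and set membership agree
def pvSync (vis : PySem.Dict Int Int) (seen : PySem.Set Int) : Prop :=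
  ∀ x : Int, (vis.get? x).isSome = PySem.Set.contains seen x

-- number of values of adj not yet visited (counted with multiplicity): bounds all future pushes
def bfsPool (adj : PySem.Dict Int (List Int)) (vis : PySem.Dict Int Int) : Nat :=
  (adj.items.map Prod.snd).flatten.countP (fun c => (vis.get? c).isNone)

-- one whole level expanded on the A (dict) side from (vis, [])
def expandLevel (adj : PySem.Dict Int (List Int)) (nd : Int) (vis : PySem.Dict Int Int)
    (l : List Int) : PySem.Dict Int Int × List Int :=
  l.foldl (fun p n => (adj.getD n []).foldl (bfsStep nd) p) (vis, [])

theorem pvPairs_append_singleton : ∀ (L : List (List Int)) (lev : List Int) (s : Int),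
    pvPairs (L ++ [lev]) s = pvPairs L s ++ lev.map (fun n => (n, s + L.length)) := by
  intro L
  induction L with
  | nil => intro lev s; simp [pvPairs]
  | cons l L ih =>
    intro lev s
    simp only [List.cons_append, pvPairs, ih, List.length_cons, List.append_assoc]
    congr 2
    refine List.map_congr_left ?_
    intro n _
    have : s + 1 + (L.length : Int) = s + ((L.length : Nat) + 1 : Nat) := by push_cast; ring
    rw [this]

theorem pvPairs_map_fst : ∀ (L : List (List Int)) (s : Int),
    (pvPairs L s).map Prod.fst = L.flatten := by
  intro L
  induction L with
  | nil => intro s; simp [pvPairs]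
  | cons l L ih =>
    intro s
    simp [pvPairs, ih, Function.comp_def]

-- the list component of the A-side state is only appended to: it can be split off
theorem foldl_shift {alpha : Type} (f : PySem.Dict Int Int × List Int → alpha → PySem.Dict Int Int × List Int)
    (hf : ∀ v q a, f (v, q) a = ((f (v, []) a).1, q ++ (f (v, []) a).2)) :
    ∀ (l : List alpha) (v : PySem.Dict Int Int) (q : List Int),
      l.foldl f (v, q) = ((l.foldl f (v, [])).1, q ++ (l.foldl f (v, [])).2) := by
  intro l
  induction l with
  | nil => intro v q; simp
  | cons a l ih =>
    intro v q
    simp only [List.foldl_cons]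
    rw [hf v q a, ih, hf v [] a]
    rw [show ((f (v, []) a).1, [] ++ (f (v, []) a).2) = ((f (v, []) a).1, (f (v, []) a).2) by simp]
    rw [ih (f (v, []) a).1 (f (v, []) a).2]
    simp

theorem bfsStep_shift (nd : Int) : ∀ (v : PySem.Dict Int Int) (q : List Int) (c : Int),
    bfsStep nd (v, q) c = ((bfsStep nd (v, []) c).1, q ++ (bfsStep nd (v, []) c).2) := by
  intro v q c
  by_cases h : (v.get? c).isSome <;> simp [bfsStep, h]

theorem inner_shift (adj : PySem.Dict Int (List Int)) (nd : Int) :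
    ∀ (v : PySem.Dict Int Int) (q : List Int) (n : Int),
      (adj.getD n []).foldl (bfsStep nd) (v, q) =
      (((adj.getD n []).foldl (bfsStep nd) (v, [])).1,
        q ++ ((adj.getD n []).foldl (bfsStep nd) (v, [])).2) := by
  intro v q n
  exact foldl_shift (bfsStep nd) (bfsStep_shift nd) (adj.getD n []) v q

theorem outer_shift (adj : PySem.Dict Int (List Int)) (nd : Int) :
    ∀ (l : List Int) (v : PySem.Dict Int Int) (q : List Int),
      l.foldl (fun p n => (adj.getD n []).foldl (bfsStep nd) p) (v, q) =
      ((expandLevel adj nd v l).1, q ++ (expandLevel adj nd v l).2) := by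
  intro l v q
  exact foldl_shift _ (fun v q n => inner_shift adj nd v q n) l v q

-- a property of the state preserved by every step is preserved by the fold
theorem foldl_pres {alpha sigma : Type} (Q : sigma → Prop) (f : sigma → alpha → sigma) :
    ∀ (l : List alpha) (s : sigma), (∀ s a, a ∈ l → Q s → Q (f s a)) → Q s → Q (l.foldl f s) := by
  intro l
  induction l with
  | nil => intro s _ hs; simpa using hs
  | cons a l ih =>
    intro s hf hs
    simp only [List.foldl_cons]
    exact ih (f s a) (fun s b hb => hf s b (List.mem_cons_of_mem a hb))
      (hf s a List.mem_cons_self hs)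

-- an existing binding is never overwritten (only unseen keys are inserted)
theorem bfsStep_pres_get? (nd m w : Int) (p : PySem.Dict Int Int × List Int) (c : Int)
    (h : p.1.get? m = some w) : (bfsStep nd p c).1.get? m = some w := by
  by_cases hc : (p.1.get? c).isSome
  · simpa [bfsStep, hc]
  · have hmc : m ≠ c := by
      intro he; rw [he] at h; simp [h] at hc
    simp [bfsStep, hc, PySem.Dict.get?_insert_of_ne _ _ hmc, h]

-- every node collected into the next frontier is stored with depth nd
theorem expandLevel_frontier_depth (adj : PySem.Dict Int (List Int)) (nd : Int)
    (vis : PySem.Dict Int Int) (l : List Int) :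
    ∀ c ∈ (expandLevel adj nd vis l).2, (expandLevel adj nd vis l).1.get? c = some nd := by
  have key : ∀ (p : PySem.Dict Int Int × List Int) (c : Int),
      (∀ m ∈ p.2, p.1.get? m = some nd) → ∀ m ∈ (bfsStep nd p c).2, (bfsStep nd p c).1.get? m = some nd := by
    intro p c hp m hm
    by_cases hc : (p.1.get? c).isSome
    · simp only [bfsStep, if_pos hc] at hm ⊢
      exact hp m hm
    · simp only [bfsStep, if_neg hc] at hm ⊢
      rcases List.mem_append.mp hm with hm | hm
      · have := hp m hm
        have hmc : m ≠ c := by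
          intro he; rw [he] at this; simp [this] at hc
        rw [PySem.Dict.get?_insert_of_ne _ _ hmc]
        exact this
      · have hme : m = c := by simpa using hm
        subst hme
        exact PySem.Dict.get?_insert_self _ _ _
  exact foldl_pres (fun p => ∀ m ∈ p.2, p.1.get? m = some nd) _ l (vis, [])
    (fun s n _ hs => foldl_pres _ _ (adj.getD n []) s (fun s c _ hs => key s c hs) hs)
    (by intro m hm; simp at hm)

-- the items of the A-side dict grow exactly by the new frontier at depth nd
theorem expandLevel_items (adj : PySem.Dict Int (List Int)) (nd : Int)
    (vis : PySem.Dict Int Int) (l : List Int) :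
    (expandLevel adj nd vis l).1.items =
      vis.items ++ (expandLevel adj nd vis l).2.map (fun n => (n, nd)) := by
  have key : ∀ (p : PySem.Dict Int Int × List Int) (c : Int),
      p.1.items = vis.items ++ p.2.map (fun n => (n, nd)) →
      (bfsStep nd p c).1.items = vis.items ++ (bfsStep nd p c).2.map (fun n => (n, nd)) := by
    intro p c hp
    by_cases hc : (p.1.get? c).isSome
    · simpa [bfsStep, hc]
    · have hcont : p.1.contains c = false := by
        rw [PySem.Dict.contains_eq_isSome_get?]
        simpa using hc
      simp only [bfsStep, if_neg hc]
      rw [PySem.Dict.items_insert_of_not_contains _ _ hcont, hp]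
      simp
  have h := foldl_pres (fun p => p.1.items = vis.items ++ p.2.map (fun n => (n, nd)))
    (fun p n => (adj.getD n []).foldl (bfsStep nd) p) l (vis, [])
    (fun s n _ hs => foldl_pres _ (bfsStep nd) (adj.getD n []) s
      (fun s c _ hs => key s c hs) hs)
    (by simp)
  exact h

-- A's expansion and B's expansion stay in lockstep: same frontier, synced states
theorem steps_corr (nd : Int) : ∀ (cs : List Int) (vis : PySem.Dict Int Int)
    (seen : PySem.Set Int) (q : List Int), pvSync vis seen →
    (cs.foldl (bfsStep nd) (vis, q)).2 = (cs.foldl bStep (seen, q)).2 ∧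
    pvSync (cs.foldl (bfsStep nd) (vis, q)).1 (cs.foldl bStep (seen, q)).1 := by
  intro cs
  induction cs with
  | nil => intro vis seen q h; exact ⟨rfl, h⟩
  | cons c cs ih =>
    intro vis seen q h
    simp only [List.foldl_cons]
    by_cases hc : (vis.get? c).isSome
    · have hs : c ∈ seen := (PySem.Set.contains_iff _ _).1 (by rw [← h c]; simpa using hc)
      rw [show bfsStep nd (vis, q) c = (vis, q) by simp [bfsStep, hc],
          show bStep (seen, q) c = (seen, q) by simp [bStep, hs]]
      exact ih vis seen q h
    · have hs : c ∉ seen := by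
        intro hm
        have := (PySem.Set.contains_iff seen c).2 hm
        rw [← h c] at this
        rw [this] at hc
        exact hc rfl
      rw [show bfsStep nd (vis, q) c = (vis.insert c nd, q ++ [c]) by simp [bfsStep, hc],
          show bStep (seen, q) c = (PySem.Set.add seen c, q ++ [c]) by
            simp [bStep, hs]]
      refine ih _ _ _ ?_
      intro x
      by_cases hx : x = c
      · subst hx
        simp [PySem.Dict.get?_insert_self, PySem.Set.mem_add]
      · rw [PySem.Dict.get?_insert_of_ne _ _ hx, h x]
        rcases hmem : PySem.Set.contains seen x with _ | _
        · symm
          rcases hadd : PySem.Set.contains (PySem.Set.add seen c) x with _ | _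
          · rfl
          · exfalso
            rcases (PySem.Set.mem_add _ _ _).1 ((PySem.Set.contains_iff _ _).1 hadd) with hm | hm
            · rw [(PySem.Set.contains_iff _ _).2 hm] at hmem; cases hmem
            · exact hx hm
        · symm
          exact (PySem.Set.contains_iff _ _).2 ((PySem.Set.mem_add _ _ _).2
            (Or.inl ((PySem.Set.contains_iff _ _).1 hmem)))

theorem level_corr (adj : PySem.Dict Int (List Int)) (nd : Int) :
    ∀ (l : List Int) (vis : PySem.Dict Int Int) (seen : PySem.Set Int) (q : List Int),
    pvSync vis seen →
    (l.foldl (fun p n => (adj.getD n []).foldl (bfsStep nd) p) (vis, q)).2 =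
      (l.foldl (fun p n => (adj.getD n []).foldl bStep p) (seen, q)).2 ∧
    pvSync (l.foldl (fun p n => (adj.getD n []).foldl (bfsStep nd) p) (vis, q)).1
      (l.foldl (fun p n => (adj.getD n []).foldl bStep p) (seen, q)).1 := by
  intro l
  induction l with
  | nil => intro vis seen q h; exact ⟨rfl, h⟩
  | cons n l ih =>
    intro vis seen q h
    simp only [List.foldl_cons]
    obtain ⟨h2, hsync⟩ := steps_corr nd (adj.getD n []) vis seen q h
    rw [show (adj.getD n []).foldl (bfsStep nd) (vis, q) =
        (((adj.getD n []).foldl (bfsStep nd) (vis, q)).1, ((adj.getD n []).foldl (bfsStep nd) (vis, q)).2) from rfl,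
        show (adj.getD n []).foldl bStep (seen, q) =
        (((adj.getD n []).foldl bStep (seen, q)).1, ((adj.getD n []).foldl bStep (seen, q)).2) from rfl,
        h2]
    exact ih _ _ _ hsync

theorem countP_strict {u : List Int} {P P' : Int → Bool} (hmono : ∀ x, P' x = true → P x = true)
    (c : Int) (hc : c ∈ u) (hPc : P c = true) (hP'c : P' c = false) :
    u.countP P' + 1 ≤ u.countP P := by
  induction u with
  | nil => simp at hc
  | cons x u ih =>
    rcases List.mem_cons.mp hc with he | hm
    · subst he
      have hle : u.countP P' ≤ u.countP P := List.countP_mono_left (fun a _ h => hmono a h)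
      simp [hPc, hP'c]
      omega
    · have hi := ih hm
      by_cases hx : P' x = true
      · simp [hx, hmono x hx]; omega
      · by_cases hpx : P x = true <;> simp [hx, hpx] <;> omega

-- membership of an adjacency list in the flattened value pool
theorem getD_subset_flatten (adj : PySem.Dict Int (List Int)) (n c : Int)
    (hc : c ∈ adj.getD n []) : c ∈ (adj.items.map Prod.snd).flatten := by
  rw [PySem.Dict.getD_eq_get?_getD] at hc
  cases hg : adj.get? n with
  | none => rw [hg] at hc; simp at hc
  | some l =>
    rw [hg] at hc
    simp only [Option.getD_some] at hc
    have hmem : (n, l) ∈ adj.items := PySem.Dict.mem_items_of_get?_eq_some adj hg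
    exact List.mem_flatten.mpr ⟨l, List.mem_map.mpr ⟨(n, l), hmem, rfl⟩, hc⟩

theorem bfsStep_pool (adj : PySem.Dict Int (List Int)) (nd : Int)
    (p : PySem.Dict Int Int × List Int) (c : Int) (hc : c ∈ (adj.items.map Prod.snd).flatten) :
    bfsPool adj (bfsStep nd p c).1 + (bfsStep nd p c).2.length ≤ bfsPool adj p.1 + p.2.length := by
  by_cases h : (p.1.get? c).isSome
  · simp [bfsStep, h]
  · have hnone : p.1.get? c = none := by
      cases hg : p.1.get? c
      · rfl
      · rw [hg] at h; simp at h
    have hkey : bfsPool adj (p.1.insert c nd) + 1 ≤ bfsPool adj p.1 := by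
      unfold bfsPool
      refine countP_strict ?_ c hc ?_ ?_
      · intro x hx
        by_cases hxc : x = c
        · subst hxc
          rw [PySem.Dict.get?_insert_self] at hx; simp at hx
        · rw [PySem.Dict.get?_insert_of_ne _ _ hxc] at hx; exact hx
      · simp [hnone]
      · rw [PySem.Dict.get?_insert_self]; simp
    simp only [bfsStep, if_neg h, List.length_append, List.length_cons, List.length_nil]
    omega

theorem expandLevel_pool (adj : PySem.Dict Int (List Int)) (nd : Int)
    (vis : PySem.Dict Int Int) (l : List Int) :
    bfsPool adj (expandLevel adj nd vis l).1 + (expandLevel adj nd vis l).2.length ≤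
      bfsPool adj vis := by
  have h := foldl_pres (fun p => bfsPool adj p.1 + p.2.length ≤ bfsPool adj vis)
    (fun p n => (adj.getD n []).foldl (bfsStep nd) p) l (vis, [])
    (fun s n _ hs => foldl_pres (fun p => bfsPool adj p.1 + p.2.length ≤ bfsPool adj vis)
      (bfsStep nd) (adj.getD n []) s
      (fun s c hcmem hs =>
        le_trans (bfsStep_pool adj nd s c (getD_subset_flatten adj n c hcmem)) hs) hs)
    (by simp)
  simpa using h

theorem aLoop_nil (adj : PySem.Dict Int (List Int)) (max_d : Int) (f : Nat)
    (vis : PySem.Dict Int Int) : bfsLoopA adj max_d f vis [] = vis := by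
  cases f <;> rfl

-- A pops nodes whose stored depth has reached max_d without any effect
theorem aLoop_skip (adj : PySem.Dict Int (List Int)) (max_d : Int) :
    ∀ (l : List Int) (f : Nat) (vis : PySem.Dict Int Int),
      (∀ n ∈ l, ∃ d, vis.get? n = some d ∧ max_d ≤ d) → l.length ≤ f →
      bfsLoopA adj max_d f vis l = vis := by
  intro l
  induction l with
  | nil => intro f vis _ _; exact aLoop_nil adj max_d f vis
  | cons n l ih =>
    intro f vis h hf
    cases f with
    | zero => simp at hf
    | succ f =>
      obtain ⟨d, hd, hled⟩ := h n List.mem_cons_self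
      simp only [bfsLoopA, hd, if_pos hled]
      exact ih f vis (fun m hm => h m (List.mem_cons_of_mem n hm))
        (by simp at hf; omega)

-- A processes one whole level l (all stored at depth d < max_d) exactly as expandLevel does
theorem aLoop_level (adj : PySem.Dict Int (List Int)) (max_d : Int) :
    ∀ (l : List Int) (f : Nat) (vis : PySem.Dict Int Int) (nx : List Int) (d : Int),
      (∀ n ∈ l, vis.get? n = some d) → ¬ max_d ≤ d → l.length ≤ f →
      bfsLoopA adj max_d f vis (l ++ nx) =
        bfsLoopA adj max_d (f - l.length) (expandLevel adj (d + 1) vis l).1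
          (nx ++ (expandLevel adj (d + 1) vis l).2) := by
  intro l
  induction l with
  | nil => intro f vis nx d _ _ _; simp [expandLevel]
  | cons n l ih =>
    intro f vis nx d h hlt hf
    cases f with
    | zero => simp at hf
    | succ f =>
      have hn : vis.get? n = some d := h n List.mem_cons_self
      simp only [List.cons_append, bfsLoopA, hn, if_neg hlt]
      rw [inner_shift adj (d + 1) vis (l ++ nx) n]
      have hpres : ∀ m ∈ l,
          ((adj.getD n []).foldl (bfsStep (d + 1)) (vis, [])).1.get? m = some d := by
        intro m hm
        exact foldl_pres (fun p => p.1.get? m = some d) (bfsStep (d + 1)) (adj.getD n [])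
          (vis, []) (fun s c _ hs => bfsStep_pres_get? (d + 1) m d s c hs)
          (h m (List.mem_cons_of_mem n hm))
      have hstep : l ++ nx ++ ((adj.getD n []).foldl (bfsStep (d + 1)) (vis, [])).2
          = l ++ (nx ++ ((adj.getD n []).foldl (bfsStep (d + 1)) (vis, [])).2) := by simp
      rw [hstep, ih f _ _ d hpres hlt (by simp at hf; omega)]
      have hexp : expandLevel adj (d + 1) vis (n :: l) =
          ((expandLevel adj (d + 1) ((adj.getD n []).foldl (bfsStep (d + 1)) (vis, [])).1 l).1,
            ((adj.getD n []).foldl (bfsStep (d + 1)) (vis, [])).2 ++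
            (expandLevel adj (d + 1) ((adj.getD n []).foldl (bfsStep (d + 1)) (vis, [])).1 l).2) := by
        unfold expandLevel
        simp only [List.foldl_cons]
        rw [show (adj.getD n []).foldl (bfsStep (d + 1)) (vis, []) =
          (((adj.getD n []).foldl (bfsStep (d + 1)) (vis, [])).1,
           ((adj.getD n []).foldl (bfsStep (d + 1)) (vis, [])).2) from rfl]
        exact outer_shift adj (d + 1) l _ _
      rw [hexp]
      simp [Nat.succ_sub_succ]

-- with an empty current level B just closes the levels list, whatever the fuel
theorem bfsLevels_nil (adj : PySem.Dict Int (List Int)) (max_d : Int) (f : Nat)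
    (seen : PySem.Set Int) (acc : List (List Int)) (d : Int) :
    bfsLevels adj max_d f seen acc [] d = acc ++ [[]] := by
  cases f <;> simp [bfsLevels]

-- the main correspondence: A's FIFO loop produces exactly the pairs of B's level lists
theorem bfs_main (adj : PySem.Dict Int (List Int)) (max_d : Int) :
    ∀ (fB fA : Nat) (vis : PySem.Dict Int Int) (seen : PySem.Set Int)
      (acc : List (List Int)) (cur : List Int) (d : Int),
      (∀ n ∈ cur, vis.get? n = some d) →
      pvSync vis seen →
      vis.items = pvPairs (acc ++ [cur]) 0 →
      d = (acc.length : Int) →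
      cur.length + bfsPool adj vis ≤ fA → 1 + bfsPool adj vis ≤ fB →
      (bfsLoopA adj max_d fA vis cur).items =
        pvPairs (bfsLevels adj max_d fB seen acc cur d) 0 := by
  intro fB
  induction fB with
  | zero => intro fA vis seen acc cur d _ _ _ _ _ hB; omega
  | succ fB ih =>
    intro fA vis seen acc cur d hdep hsync hitems hd hA hB
    by_cases hfr : cur = []
    · subst hfr
      rw [aLoop_nil, bfsLevels_nil]
      exact hitems
    · by_cases hcut : max_d ≤ d
      · rw [bfsLevels, if_pos (by simp [hcut])]
        rw [aLoop_skip adj max_d cur fA vis (fun n hn => ⟨d, hdep n hn, hcut⟩) (by omega)]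
        exact hitems
      · rw [bfsLevels, if_neg (by simp [List.isEmpty_iff, hfr, hcut])]
        have hAlevel := aLoop_level adj max_d cur fA vis [] d hdep hcut (by omega)
        simp only [List.append_nil, List.nil_append] at hAlevel
        rw [hAlevel]
        obtain ⟨hfr2, hsync'⟩ := level_corr adj (d + 1) cur vis seen [] hsync
        rw [← hfr2]
        rw [show cur.foldl (fun p n => (adj.getD n []).foldl (bfsStep (d + 1)) p) (vis, []) =
            expandLevel adj (d + 1) vis cur from rfl] at hfr2 hsync' ⊢
        have hnewitems : (expandLevel adj (d + 1) vis cur).1.items =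
            pvPairs ((acc ++ [cur]) ++ [(expandLevel adj (d + 1) vis cur).2]) 0 := by
          rw [pvPairs_append_singleton, ← hitems, expandLevel_items]
          have harr : (0 : Int) + (((acc ++ [cur]).length : Nat) : Int) = d + 1 := by
            simp only [List.length_append, List.length_cons, List.length_nil]
            push_cast
            omega
          rw [harr]
        have hpool := expandLevel_pool adj (d + 1) vis cur
        by_cases h2 : (expandLevel adj (d + 1) vis cur).2 = []
        · rw [h2] at hnewitems ⊢
          rw [aLoop_nil, bfsLevels_nil]
          exact hnewitems
        · have h2len : 1 ≤ (expandLevel adj (d + 1) vis cur).2.length :=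
            Nat.one_le_iff_ne_zero.mpr (by simpa [List.length_eq_zero_iff] using h2)
          refine ih (fA - cur.length) _ _ (acc ++ [cur]) _ (d + 1)
            (fun n hn => expandLevel_frontier_depth adj (d + 1) vis cur n hn)
            hsync' hnewitems (by simp [hd]) (by omega) (by omega)

-- A's loop keeps the dict keys Nodup
theorem aLoop_nodup_keys (adj : PySem.Dict Int (List Int)) (max_d : Int) :
    ∀ (f : Nat) (vis : PySem.Dict Int Int) (q : List Int), vis.keys.Nodup →
      (bfsLoopA adj max_d f vis q).keys.Nodup := by
  have key : ∀ (nd : Int) (p : PySem.Dict Int Int × List Int) (c : Int),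
      p.1.keys.Nodup → (bfsStep nd p c).1.keys.Nodup := by
    intro nd p c hp
    by_cases hc : (p.1.get? c).isSome
    · simpa [bfsStep, hc]
    · simp only [bfsStep, if_neg hc]
      exact PySem.Dict.nodup_keys_insert _ _ _ hp
  intro f
  induction f with
  | zero => intro vis q h; exact h
  | succ f ih =>
    intro vis q h
    match q with
    | [] => exact h
    | n :: q =>
      cases hg : vis.get? n with
      | none => simp only [bfsLoopA, hg]; exact h
      | some d =>
        by_cases hcut : max_d ≤ d
        · simp only [bfsLoopA, hg, if_pos hcut]
          exact ih vis q h
        · simp only [bfsLoopA, hg, if_neg hcut]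
          exact ih _ _ (foldl_pres (fun p => p.1.keys.Nodup) (bfsStep (d + 1))
            (adj.getD n []) (vis, q) (fun s c _ hs => key (d + 1) s c hs) h)

-- folding fresh distinct keys of enumerated levels into a dict appends exactly pvPairs
theorem mkDict_items : ∀ (lv : List (List Int)) (s : Int) (dct : PySem.Dict Int Int),
    lv.flatten.Nodup → (∀ n ∈ lv.flatten, dct.contains n = false) →
    ((PySem.List.enumerate lv s).foldl
        (fun dct p => p.2.foldl (fun dct n => dct.insert n p.1) dct) dct).items
      = dct.items ++ pvPairs lv s := by
  intro lv
  induction lv with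
  | nil => intro s dct _ _; simp [PySem.List.enumerate_nil, pvPairs]
  | cons lev rest ih =>
    intro s dct hnd hfresh
    rw [PySem.List.enumerate_cons]
    simp only [List.foldl_cons]
    have hndlev : lev.Nodup := (List.nodup_append.1 (by simpa using hnd)).1
    have hinner : (lev.foldl (fun dct n => dct.insert n s) dct).items =
        dct.items ++ lev.map (fun n => (n, s)) := by
      exact PySem.Dict.items_foldl_insert_fresh lev (fun n => n) (fun _ => s) dct
        (fun a ha => hfresh a (List.mem_flatten.2 ⟨lev, by simp, ha⟩)) (by simpa using hndlev)
    have hkeys : (lev.foldl (fun dct n => dct.insert n s) dct).keys =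
        PySem.Set.update dct.keys lev := PySem.Dict.keys_foldl_insert lev _ dct
    have hfresh' : ∀ n ∈ rest.flatten, (lev.foldl (fun dct n => dct.insert n s) dct).contains n = false := by
      intro n hn
      have hnk : n ∉ dct.keys := by
        have := hfresh n (by rw [List.flatten_cons]; exact List.mem_append.2 (Or.inr hn))
        intro hmem
        rw [(PySem.Dict.contains_iff_mem_keys _ _).2 hmem] at this
        cases this
      have hnl : n ∉ lev := by
        have hdisj := (List.nodup_append.1 (by simpa using hnd)).2.2
        intro hmem
        exact false_of_ne (hdisj n hmem n hn)
      rcases hc : (lev.foldl (fun dct n => dct.insert n s) dct).contains n with _ | _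
      · exact hc
      · exfalso
        have := (PySem.Dict.contains_iff_mem_keys _ _).1 hc
        rw [hkeys] at this
        rcases (PySem.Set.mem_update _ _ _).1 this with hm | hm
        · exact hnk hm
        · exact hnl hm
    rw [ih (s + 1) _ ((List.nodup_append.1 (by simpa using hnd)).2.1) hfresh', hinner]
    simp [pvPairs]

-- ===== VERDICT (by name: the statement is the Claim_ definition above) =====
theorem bfs_py_spec : Claim_equal_bfs_py := by
  intro start adj max_d _
  unfold Spec_bfs_py bfs_py bfs_py_alt
  have hsync0 : pvSync (PySem.Dict.empty.insert start 0) (PySem.Set.ofList [start]) := by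
    intro x
    by_cases hx : x = start
    · subst hx
      have hmem : x ∈ PySem.Set.ofList [x] :=
        (PySem.Set.mem_ofList _ _).2 (List.mem_singleton_self x)
      rw [PySem.Dict.get?_insert_self, (PySem.Set.contains_iff _ _).2 hmem]
      rfl
    · rw [PySem.Dict.get?_insert_of_ne _ _ hx]
      rcases hc : PySem.Set.contains (PySem.Set.ofList [start]) x with _ | _
      · simp [PySem.Dict.get?_empty]
      · exfalso
        have := (PySem.Set.mem_ofList _ _).1 ((PySem.Set.contains_iff _ _).1 hc)
        simp at this
        exact hx this
  have hpoolle : bfsPool ⟨adj⟩ (PySem.Dict.empty.insert start 0) ≤ ((adj.map Prod.snd).flatten).length :=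
    le_trans List.countP_le_length (le_of_eq rfl)
  have hmain := bfs_main ⟨adj⟩ max_d (1 + ((adj.map Prod.snd).flatten).length)
    (1 + ((adj.map Prod.snd).flatten).length)
    (PySem.Dict.empty.insert start 0) (PySem.Set.ofList [start]) [] [start] 0
    (by
      intro n hn
      have he : n = start := by simpa using hn
      subst he
      exact PySem.Dict.get?_insert_self _ _ _)
    hsync0
    (by
      rw [PySem.Dict.items_insert_of_not_contains _ _ (PySem.Dict.contains_empty start)]
      simp [pvPairs, PySem.Dict.empty])
    (by simp)
    (by simp only [List.length_cons, List.length_nil]; omega)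
    (by omega)
  have hnodup : (bfsLoopA ⟨adj⟩ max_d (1 + ((adj.map Prod.snd).flatten).length)
      (PySem.Dict.empty.insert start 0) [start]).keys.Nodup := by
    apply aLoop_nodup_keys
    rw [PySem.Dict.keys_insert_of_not_contains _ _ (PySem.Dict.contains_empty start)]
    simp [PySem.Dict.keys_empty]
  have hflat : (bfsLevels ⟨adj⟩ max_d (1 + ((adj.map Prod.snd).flatten).length)
      (PySem.Set.ofList [start]) [] [start] 0).flatten.Nodup := by
    have hkeys : (bfsLoopA ⟨adj⟩ max_d (1 + ((adj.map Prod.snd).flatten).length)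
        (PySem.Dict.empty.insert start 0) [start]).keys =
        (bfsLevels ⟨adj⟩ max_d (1 + ((adj.map Prod.snd).flatten).length)
          (PySem.Set.ofList [start]) [] [start] 0).flatten := by
      rw [show (bfsLoopA ⟨adj⟩ max_d (1 + ((adj.map Prod.snd).flatten).length)
        (PySem.Dict.empty.insert start 0) [start]).keys =
        ((bfsLoopA ⟨adj⟩ max_d (1 + ((adj.map Prod.snd).flatten).length)
          (PySem.Dict.empty.insert start 0) [start]).items).map Prod.fst from rfl, hmain,
        pvPairs_map_fst]
    rw [← hkeys]
    exact hnodup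
  rw [mkDict_items _ 0 PySem.Dict.empty hflat (fun n _ => PySem.Dict.contains_empty n)]
  rw [hmain]
  rfl
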